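-- pv_equiv track=rewrite | github.com/bianzheng123/reverse-k-ranks | script/groundtruth.py | reverse_mips_gnd
-- ===== SOURCE A (Python) =====
-- def reverse_mips_gnd(gnd_idx, query_idx_l):
--     reverse_mips_gnd_l = []
--     for idx in query_idx_l:
--         r_mips_gnd = []
--         for i, mips_gnd in enumerate(gnd_idx, 0):
--             if idx in mips_gnd:
--                 r_mips_gnd.append(i)
--
--         reverse_mips_gnd_l.append(r_mips_gnd)
--     return reverse_mips_gnd_l
-- ===== SOURCE B (Python) =====
-- def reverse_mips_gnd(gnd_idx, query_idx_l):
--     # Build once: value -> list of gnd rows (indices, ascending) containing it.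
--     index = {}
--     for i, mips_gnd in enumerate(gnd_idx):
--         for v in set(mips_gnd):
--             index.setdefault(v, []).append(i)
--     return [index.get(idx, []) for idx in query_idx_l]
-- ===== Notes on version B (the rewrite author's own statement) =====
-- stated objective: faster
-- what changed: Instead of scanning every gnd list per query, B builds a value->sorted-row-index dictionary in one pass over gnd_idx and answers each query by a single lookup.
import Mathlib
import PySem

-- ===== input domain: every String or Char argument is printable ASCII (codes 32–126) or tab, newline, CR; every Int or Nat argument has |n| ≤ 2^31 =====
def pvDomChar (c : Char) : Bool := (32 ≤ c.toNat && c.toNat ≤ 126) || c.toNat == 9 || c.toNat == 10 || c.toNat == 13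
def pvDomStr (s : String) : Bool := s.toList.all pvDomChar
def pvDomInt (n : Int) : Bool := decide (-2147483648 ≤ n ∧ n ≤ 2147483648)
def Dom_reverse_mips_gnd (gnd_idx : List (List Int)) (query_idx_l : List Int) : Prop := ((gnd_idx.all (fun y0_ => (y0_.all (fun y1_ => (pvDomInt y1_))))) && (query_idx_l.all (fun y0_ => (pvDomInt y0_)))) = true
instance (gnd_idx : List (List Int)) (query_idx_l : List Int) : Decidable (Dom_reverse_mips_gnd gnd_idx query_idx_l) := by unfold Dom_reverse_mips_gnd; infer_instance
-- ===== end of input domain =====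

-- B replaces A's per-query scan of all gnd lists by a value→row-indices dictionary built once (faster, asymptotic).

-- ===== PORT A =====
def reverse_mips_gnd (gnd_idx : List (List Int)) (query_idx_l : List Int) : List (List Int) :=
  query_idx_l.foldl
    (fun reverse_mips_gnd_l idx =>
      reverse_mips_gnd_l ++
        [(PySem.List.enumerate gnd_idx 0).foldl
          (fun r_mips_gnd p => if idx ∈ p.2 then r_mips_gnd ++ [p.1] else r_mips_gnd) []])
    []

-- ===== PORT B =====
def reverse_mips_gnd_alt (gnd_idx : List (List Int)) (query_idx_l : List Int) : List (List Int) :=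
  let index : PySem.Dict Int (List Int) :=
    (PySem.List.enumerate gnd_idx 0).foldl
      (fun d p => (PySem.Set.ofList p.2).foldl
        (fun d v => d.modify v [] (fun l => l ++ [p.1])) d)
      PySem.Dict.empty
  query_idx_l.map (fun idx => index.getD idx [])

-- ===== PRECONDITION & SPEC =====
def Spec_reverse_mips_gnd (gnd_idx : List (List Int)) (query_idx_l : List Int) (out : List (List Int)) : Prop := out = reverse_mips_gnd_alt gnd_idx query_idx_l
instance (gnd_idx : List (List Int)) (query_idx_l : List Int) (out : List (List Int)) : Decidable (Spec_reverse_mips_gnd gnd_idx query_idx_l out) := by unfold Spec_reverse_mips_gnd; infer_instance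

-- ===== CLAIM (what is proved, stated in full; the proofs are below) =====
def Claim_equal_reverse_mips_gnd : Prop := ∀ (gnd_idx : List (List Int)) (query_idx_l : List Int), Dom_reverse_mips_gnd gnd_idx query_idx_l → Spec_reverse_mips_gnd gnd_idx query_idx_l (reverse_mips_gnd gnd_idx query_idx_l)

-- ===== LEMMAS AND PROOFS =====

-- occurrence list: rows of g (numbered from n) that contain k
def pvOcc (g : List (List Int)) (n : Int) (k : Int) : List Int :=
  match g with
  | [] => []
  | r :: rs => (if k ∈ r then [n] else []) ++ pvOcc rs (n + 1) k

-- A's inner loop computes pvOcc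
theorem pvA_inner (g : List (List Int)) (n k : Int) (acc : List Int) :
    (PySem.List.enumerate g n).foldl
      (fun r p => if k ∈ p.2 then r ++ [p.1] else r) acc = acc ++ pvOcc g n k := by
  induction g generalizing n acc with
  | nil => simp [PySem.List.enumerate_nil, pvOcc]
  | cons r rs ih =>
      simp only [PySem.List.enumerate_cons, List.foldl_cons, pvOcc]
      by_cases h : k ∈ r <;> simp [h, ih]

-- a fold over values not containing k leaves d.getD k [] unchanged
theorem pvRow_skip (s : List Int) (i : Int) (d : PySem.Dict Int (List Int)) (k : Int)
    (hk : k ∉ s) :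
    (s.foldl (fun d v => d.modify v [] (fun l => l ++ [i])) d).getD k [] = d.getD k [] := by
  induction s generalizing d with
  | nil => rfl
  | cons v vs ih =>
      simp only [List.mem_cons, not_or] at hk
      simp only [List.foldl_cons]
      rw [ih _ hk.2, PySem.Dict.getD_modify]; simp [hk.1]

-- a fold over a duplicate-free row appends i to d[k] exactly when k is in the row
theorem pvRow_step (s : List Int) (i : Int) (d : PySem.Dict Int (List Int)) (k : Int)
    (hnd : s.Nodup) :
    (s.foldl (fun d v => d.modify v [] (fun l => l ++ [i])) d).getD k [] =
      d.getD k [] ++ (if k ∈ s then [i] else []) := by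
  induction s generalizing d with
  | nil => simp
  | cons v vs ih =>
      simp only [List.nodup_cons] at hnd
      simp only [List.foldl_cons]
      by_cases hvk : k = v
      · subst hvk
        rw [pvRow_skip _ _ _ _ hnd.1, PySem.Dict.getD_modify_self]
        simp
      · rw [ih _ hnd.2, PySem.Dict.getD_modify]
        simp only [if_neg hvk]
        simp [hvk]

-- the dictionary built by B maps k to pvOcc
theorem pvB_dict (g : List (List Int)) (n : Int) (d : PySem.Dict Int (List Int)) (k : Int) :
    ((PySem.List.enumerate g n).foldl
      (fun d p => (PySem.Set.ofList p.2).foldl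
        (fun d v => d.modify v [] (fun l => l ++ [p.1])) d) d).getD k [] =
      d.getD k [] ++ pvOcc g n k := by
  induction g generalizing n d with
  | nil => simp [PySem.List.enumerate_nil, pvOcc]
  | cons r rs ih =>
      simp only [PySem.List.enumerate_cons, List.foldl_cons, pvOcc]
      rw [ih, pvRow_step _ _ _ _ (PySem.Set.nodup_ofList r)]
      simp [PySem.Set.mem_ofList, List.append_assoc]

-- ===== VERDICT (by name: the statement is the Claim_ definition above) =====
theorem reverse_mips_gnd_spec : Claim_equal_reverse_mips_gnd := by
  intro gnd_idx query_idx_l _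
  unfold Spec_reverse_mips_gnd reverse_mips_gnd reverse_mips_gnd_alt
  rw [PySem.List.foldl_append_singleton_eq_map]
  apply List.map_congr_left
  intro idx _
  rw [pvA_inner, pvB_dict]
  simp
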